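-- pv_equiv track=rewrite | github.com/icarusdes/verseny_kodok | adventofcode_2024/day24/day24_part2.py | numbers_to_values
-- ===== SOURCE A (Python) =====
-- def numbers_to_values(x, y):
--     values = {}
--     x_bits = [int(i) for i in bin(x)[2:]]
--     y_bits = [int(i) for i in bin(y)[2:]]
--     for i, bit in enumerate(x_bits):
--         values[f"x{i}"] = bit
--     for i, bit in enumerate(y_bits):
--         values[f"y{i}"] = bit
--     return values
-- ===== SOURCE B (Python) =====
-- def numbers_to_values(x, y):
--     def bits(name, v):
--         # recurse on the high bits first, then append the lowest bit;
--         # the key index of the appended bit is the number of higher bits.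
--         if v < 2:
--             return [(f"{name}0", v)]
--         pairs = bits(name, v // 2)
--         pairs.append((f"{name}{len(pairs)}", v % 2))
--         return pairs
--     return dict(bits("x", x) + bits("y", y))
-- ===== Notes on version B (the rewrite author's own statement) =====
-- stated objective: alternative
-- what changed: B builds each operand's key/bit pairs by structural recursion on v//2 (high bits first, appending the low bit v%2 with its index taken from the pair count) and returns dict() of the concatenated pair lists, instead of A's two staged passes that format the number as a binary string, re-parse every character with int(), and write bits into a dict by enumerate index.
import Mathlib
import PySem

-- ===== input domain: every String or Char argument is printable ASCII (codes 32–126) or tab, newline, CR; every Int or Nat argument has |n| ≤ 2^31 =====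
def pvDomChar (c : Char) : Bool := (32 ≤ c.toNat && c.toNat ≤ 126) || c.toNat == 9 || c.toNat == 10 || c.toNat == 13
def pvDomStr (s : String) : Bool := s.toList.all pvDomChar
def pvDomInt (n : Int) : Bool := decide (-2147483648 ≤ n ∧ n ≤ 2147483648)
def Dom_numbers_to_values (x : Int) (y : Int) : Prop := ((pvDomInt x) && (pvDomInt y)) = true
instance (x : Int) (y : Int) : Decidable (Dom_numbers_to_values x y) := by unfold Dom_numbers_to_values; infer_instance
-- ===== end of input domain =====

-- B replaces A's bin()-string parsing and staged enumerate passes by a structural recursion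
-- on v // 2 that builds the key/bit pairs directly; alternative decomposition, same cost.
-- Equivalence is proved for nonnegative inputs (A raises ValueError on negative ones).

-- ===== PORT A =====
-- [int(i) for i in bin(v)[2:]] : bin(v) is PySem.Int.toBinChars0b, [2:] is PySem.List.slice,
-- int(i) on the one-char string is PySem.Int.ofChars? [c]; none = ValueError.
def pyBits? (v : Int) : Option (List Int) :=
  (PySem.List.slice (PySem.Int.toBinChars0b v) (some 2) none).mapM
    (fun c => PySem.Int.ofChars? [c])

def numbers_to_values (x : Int) (y : Int) : List (String × Int) :=
  match pyBits? x, pyBits? y with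
  | some x_bits, some y_bits =>
      -- for i, bit in enumerate(x_bits): values[f"x{i}"] = bit   (then the same for y)
      let d1 := (PySem.List.enumerate x_bits).foldl
        (fun d p => d.insert ("x" ++ PySem.Int.toStr p.1) p.2) PySem.Dict.empty
      let d2 := (PySem.List.enumerate y_bits).foldl
        (fun d p => d.insert ("y" ++ PySem.Int.toStr p.1) p.2) d1
      d2.items
  | _, _ => []   -- int(c) raised ValueError (negative argument); excluded by Pre_

-- ===== PORT B =====
-- bits(name, v): if v < 2 return [(name+"0", v)]; otherwise recurse on v // 2, then append
-- the lowest bit v % 2 keyed by the number of pairs already produced.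
def bitsRec (name : String) (v : Int) : List (String × Int) :=
  if v < 2 then [(name ++ "0", v)]
  else
    let p := bitsRec name (PySem.Int.floordiv v 2)
    p ++ [(name ++ PySem.Int.toStr (p.length : Int), PySem.Int.mod v 2)]
termination_by v.toNat
decreasing_by
  have h2 : PySem.Int.floordiv v 2 = v / 2 := PySem.Int.floordiv_eq_ediv_of_pos (by omega)
  rw [h2]; omega

-- return dict(bits("x", x) + bits("y", y))
def numbers_to_values_alt (x : Int) (y : Int) : List (String × Int) :=
  ((bitsRec "x" x ++ bitsRec "y" y).foldl
    (fun d q => d.insert q.1 q.2) PySem.Dict.empty).items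

-- ===== PRECONDITION & SPEC =====
-- Pre_ excludes negative arguments: there bin(v)[2:] starts with 'b' and A raises ValueError.
def Pre_numbers_to_values (x : Int) (y : Int) : Prop := 0 ≤ x ∧ 0 ≤ y
instance (x : Int) (y : Int) : Decidable (Pre_numbers_to_values x y) := by unfold Pre_numbers_to_values; infer_instance
def pvWitness_numbers_to_values : Int × Int := (5, 0)

def Spec_numbers_to_values (x : Int) (y : Int) (out : List (String × Int)) : Prop := out = numbers_to_values_alt x y
instance (x : Int) (y : Int) (out : List (String × Int)) : Decidable (Spec_numbers_to_values x y out) := by unfold Spec_numbers_to_values; infer_instance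

-- ===== CLAIM (what is proved, stated in full; the proofs are below) =====
def Claim_equal_numbers_to_values : Prop := ∀ (x : Int) (y : Int), Dom_numbers_to_values x y → Pre_numbers_to_values x y → Spec_numbers_to_values x y (numbers_to_values x y)

-- ===== LEMMAS AND PROOFS =====

-- the bit list A parses out of bin(v), stated over v.toNat
def bitsOf (m : Nat) : List Int :=
  if m = 0 then [0] else ((Nat.digits 2 m).map (Int.ofNat)).reverse

lemma toDigitsCore_two_eq (f : Nat) : ∀ (m : Nat) (acc : List Char), 0 < m → m ≤ f →
    Nat.toDigitsCore 2 f m acc = ((Nat.digits 2 m).map Nat.digitChar).reverse ++ acc := by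
  induction f with
  | zero => intro m acc hm hf; omega
  | succ f ih =>
    intro m acc hm hf
    rw [Nat.toDigitsCore]
    rw [Nat.digits_def' (by norm_num : 1 < 2) hm]
    by_cases h2 : m / 2 = 0
    · simp [h2, Nat.digits_zero]
    · have hpos : 0 < m / 2 := Nat.pos_of_ne_zero h2
      have hle : m / 2 ≤ f := by omega
      simp only [h2, if_false, ih (m / 2) _ hpos hle]
      simp

lemma toDigits_two_eq (m : Nat) (hm : 0 < m) :
    Nat.toDigits 2 m = ((Nat.digits 2 m).map Nat.digitChar).reverse := by
  unfold Nat.toDigits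
  rw [toDigitsCore_two_eq (m + 1) m [] hm (by omega)]
  simp

lemma mapM_digitChar (l : List Nat) (hl : ∀ d ∈ l, d < 2) :
    (l.map Nat.digitChar).mapM (fun c => PySem.Int.ofChars? [c]) = some (l.map Int.ofNat) := by
  induction l with
  | nil => rfl
  | cons d l ih =>
    have hd : d < 2 := hl d (List.mem_cons_self)
    have hrest := ih (fun e he => hl e (List.mem_cons_of_mem d he))
    interval_cases d <;> simp [List.mapM_cons, hrest] <;> rfl

lemma pyBits?_eq (v : Int) (hv : 0 ≤ v) : pyBits? v = some (bitsOf v.toNat) := by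
  unfold pyBits? bitsOf
  have hneg : ¬ v < 0 := by omega
  rw [PySem.Int.toBinChars0b, if_neg hneg]
  have hslice : PySem.List.slice ('0' :: 'b' :: Nat.toDigits 2 v.toNat) (some 2) none
      = Nat.toDigits 2 v.toNat := by simp [pysem]
  rw [hslice]
  by_cases h0 : v.toNat = 0
  · rw [h0]; rfl
  · rw [toDigits_two_eq v.toNat (Nat.pos_of_ne_zero h0), if_neg h0, ← List.map_reverse,
        mapM_digitChar _ (fun d hd => Nat.digits_lt_base (by norm_num) (List.mem_reverse.mp hd)),
        List.map_reverse]

-- bitsOf splits off its last (lowest) bit for m ≥ 2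
lemma bitsOf_split (m : Nat) (hm : 2 ≤ m) :
    bitsOf m = bitsOf (m / 2) ++ [((m % 2 : Nat) : Int)] := by
  have h0 : m ≠ 0 := by omega
  have h1 : m / 2 ≠ 0 := by omega
  unfold bitsOf
  rw [if_neg h0, if_neg h1, Nat.digits_def' (by norm_num : 1 < 2) (by omega)]
  simp

-- B's recursion produces exactly A's enumerate-keyed pairs
lemma bitsRec_eq (name : String) (v : Int) (hv : 0 ≤ v) :
    bitsRec name v = (PySem.List.enumerate (bitsOf v.toNat)).map
        (fun p => (name ++ PySem.Int.toStr p.1, p.2)) := by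
  induction v using (bitsRec.induct name) with
  | case1 v hlt =>
    rw [bitsRec, if_pos hlt]
    have : v = 0 ∨ v = 1 := by omega
    rcases this with rfl | rfl <;> rfl
  | case2 v hlt ih =>
    have h2 : (2 : Int) ≤ v := by omega
    have hd : PySem.Int.floordiv v 2 = v / 2 := PySem.Int.floordiv_eq_ediv_of_pos (by omega)
    have hd0 : 0 ≤ v / 2 := by omega
    have hnat : (v / 2).toNat = v.toNat / 2 := by omega
    rw [bitsRec, if_neg hlt]
    simp only [hd] at ih ⊢
    rw [ih hd0, hnat]
    rw [bitsOf_split v.toNat (by omega), PySem.List.enumerate_append, List.map_append]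
    congr 1
    rw [PySem.Int.mod_eq_emod_of_pos (by omega : (0:Int) < 2)]
    simp [PySem.List.enumerate_cons, PySem.List.enumerate_nil,
          PySem.List.length_enumerate]
    omega

-- ===== VERDICT (by name: the statement is the Claim_ definition above) =====
theorem numbers_to_values_spec : Claim_equal_numbers_to_values := by
  intro x y _ hpre
  obtain ⟨hx, hy⟩ := hpre
  unfold Spec_numbers_to_values numbers_to_values numbers_to_values_alt
  rw [pyBits?_eq x hx, pyBits?_eq y hy]
  simp only []
  rw [bitsRec_eq "x" x hx, bitsRec_eq "y" y hy, List.foldl_append,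
      List.foldl_map, List.foldl_map]
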